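-- pv_equiv track=rewrite | github.com/tomfluff/UTokyo_CI_Entrance_Exam | 2015-Winter/q_05.py | g_dyn
-- ===== SOURCE A (Python) =====
-- import math
--
-- def g_dyn(n):
--     last = 1
--     p = int(math.pow(2, 26))
--     a = 1103515245
--     c = 12345
--     for i in range(1,n+1):
--         last = (a * last + c) & (p-1)
--
--     return last
-- ===== SOURCE B (Python) =====
-- def g_dyn(n):
--     p = 67108864  # 2**26
--     a = 1103515245
--     c = 12345
--
--     def comp(f, g):
--         # composition of affine maps x -> f0*x+f1 after x -> g0*x+g1, mod p
--         return ((f[0] * g[0]) % p, (f[0] * g[1] + f[1]) % p)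
--
--     def pw(m):
--         # affine map representing m iterations of x -> (a*x+c) % p
--         if m == 0:
--             return (1, 0)
--         h = pw(m // 2)
--         h2 = comp(h, h)
--         return comp((a, c), h2) if m % 2 == 1 else h2
--
--     if n <= 0:
--         return 1
--     A, C = pw(n)
--     return (A * 1 + C) % p
-- ===== Notes on version B (the rewrite author's own statement) =====
-- stated objective: faster
-- what changed: replaces the n-step LCG loop by O(log n) binary exponentiation of the affine map x -> (a*x+c) mod 2^26, composing affine maps instead of iterating
import Mathlib
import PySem

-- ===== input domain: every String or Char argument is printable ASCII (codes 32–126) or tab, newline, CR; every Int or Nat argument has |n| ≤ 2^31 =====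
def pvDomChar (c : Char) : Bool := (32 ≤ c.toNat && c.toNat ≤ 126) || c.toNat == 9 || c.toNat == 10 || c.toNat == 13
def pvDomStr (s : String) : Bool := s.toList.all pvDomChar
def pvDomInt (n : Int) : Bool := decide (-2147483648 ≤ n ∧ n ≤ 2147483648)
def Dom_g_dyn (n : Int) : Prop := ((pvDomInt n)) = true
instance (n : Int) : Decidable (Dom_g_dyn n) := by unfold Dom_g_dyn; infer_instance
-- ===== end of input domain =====

-- B replaces the n-step LCG loop by binary exponentiation of the affine step map (measured faster at large n).

-- ===== PORT A =====
def g_dyn (n : Int) : Int :=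
  let p : Int := 67108864  -- int(math.pow(2, 26)) is exactly 2^26 (a float-representable power of two)
  let a : Int := 1103515245
  let c : Int := 12345
  (PySem.List.pyRange 1 (n + 1) 1).foldl
    (fun last _i => PySem.Int.band (a * last + c) (p - 1)) 1

-- ===== PORT B =====
-- helper comp of Source B: composition of the affine maps x ↦ f.1*x+f.2 and x ↦ g.1*x+g.2, mod p
def pvComp (f g : Int × Int) : Int × Int :=
  ((f.1 * g.1) % 67108864, (f.1 * g.2 + f.2) % 67108864)

-- helper pw of Source B: affine map representing m iterations of x ↦ (a*x+c) % p
def pvPw (m : Nat) : Int × Int :=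
  if h : m = 0 then (1, 0)
  else
    let hf := pvPw (m / 2)
    let h2 := pvComp hf hf
    if m % 2 = 1 then pvComp (1103515245, 12345) h2 else h2
decreasing_by exact Nat.div_lt_self (Nat.pos_of_ne_zero h) one_lt_two

def g_dyn_alt (n : Int) : Int :=
  if n ≤ 0 then 1
  else
    let AC := pvPw n.toNat
    (AC.1 * 1 + AC.2) % 67108864

-- ===== PRECONDITION & SPEC =====
def Spec_g_dyn (n : Int) (out : Int) : Prop := out = g_dyn_alt n
instance (n : Int) (out : Int) : Decidable (Spec_g_dyn n out) := by unfold Spec_g_dyn; infer_instance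

-- ===== CLAIM (what is proved, stated in full; the proofs are below) =====
def Claim_equal_g_dyn : Prop := ∀ (n : Int), Dom_g_dyn n → Spec_g_dyn n (g_dyn n)

-- ===== LEMMAS AND PROOFS =====

-- the LCG step mod 2^26, as plain emod
def pvStep (x : Int) : Int := (1103515245 * x + 12345) % 67108864

-- semantics of an affine pair
def pvApply (f : Int × Int) (x : Int) : Int := (f.1 * x + f.2) % 67108864

lemma pv_band_step (x : Int) (hx : 0 ≤ x) :
    PySem.Int.band (1103515245 * x + 12345) (67108864 - 1) = pvStep x := by
  have hy : (0 : Int) ≤ 1103515245 * x + 12345 := by positivity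
  rw [PySem.Int.band_of_nonneg hy (by norm_num)]
  have h26 : ((67108864 - 1 : Int)).toNat = 2 ^ 26 - 1 := by decide
  rw [h26, Nat.and_two_pow_sub_one_eq_mod]
  unfold pvStep
  have := Int.toNat_of_nonneg hy
  omega

lemma pv_foldA (l : List Int) (s : Int) (hs : 0 ≤ s) :
    l.foldl (fun last _i => PySem.Int.band (1103515245 * last + 12345) (67108864 - 1)) s
      = pvStep^[l.length] s := by
  induction l generalizing s with
  | nil => rfl
  | cons a l ih =>
    simp only [List.foldl_cons, List.length_cons]
    have hns : 0 ≤ pvStep s := Int.emod_nonneg _ (by norm_num)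
    rw [pv_band_step s hs, ih (pvStep s) hns, ← Function.iterate_succ_apply]

lemma pv_modeq (a : Int) : a % 67108864 ≡ a [ZMOD 67108864] :=
  Int.emod_emod_of_dvd a dvd_rfl

lemma pv_apply_comp (f g : Int × Int) (x : Int) :
    pvApply (pvComp f g) x = pvApply f (pvApply g x) := by
  unfold pvApply pvComp
  simp only
  have h1 : (f.1 * g.1 % 67108864) * x + (f.1 * g.2 + f.2) % 67108864
      ≡ f.1 * (g.1 * x + g.2) + f.2 [ZMOD 67108864] := by
    calc (f.1 * g.1 % 67108864) * x + (f.1 * g.2 + f.2) % 67108864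
        ≡ (f.1 * g.1) * x + (f.1 * g.2 + f.2) [ZMOD 67108864] :=
          ((pv_modeq _).mul_right x).add (pv_modeq _)
      _ = f.1 * (g.1 * x + g.2) + f.2 := by ring
  have h2 : f.1 * ((g.1 * x + g.2) % 67108864) + f.2
      ≡ f.1 * (g.1 * x + g.2) + f.2 [ZMOD 67108864] :=
    ((pv_modeq _).mul_left f.1).add_right f.2
  exact h1.trans h2.symm

lemma pv_step_bounds (x : Int) : 0 ≤ pvStep x ∧ pvStep x < 67108864 :=
  ⟨Int.emod_nonneg _ (by norm_num), Int.emod_lt_of_pos _ (by norm_num)⟩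

lemma pv_iter_bounds (k : Nat) (x : Int) (hx0 : 0 ≤ x) (hx1 : x < 67108864) :
    0 ≤ pvStep^[k] x ∧ pvStep^[k] x < 67108864 := by
  cases k with
  | zero => exact ⟨hx0, hx1⟩
  | succ k => rw [Function.iterate_succ_apply']; exact pv_step_bounds _

lemma pv_pw_apply (m : Nat) (x : Int) (hx0 : 0 ≤ x) (hx1 : x < 67108864) :
    pvApply (pvPw m) x = pvStep^[m] x := by
  induction m using Nat.strong_induction_on generalizing x with
  | _ m ih =>
    rw [pvPw]
    by_cases h0 : m = 0
    · simp only [h0, dif_pos]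
      unfold pvApply
      simpa using Int.emod_eq_of_lt hx0 hx1
    · have hlt : m / 2 < m := Nat.div_lt_self (Nat.pos_of_ne_zero h0) one_lt_two
      have hb := pv_iter_bounds (m / 2) x hx0 hx1
      have hrec : pvApply (pvComp (pvPw (m / 2)) (pvPw (m / 2))) x
          = pvStep^[m / 2 + m / 2] x := by
        rw [pv_apply_comp, ih _ hlt x hx0 hx1, ih _ hlt _ hb.1 hb.2,
            ← Function.iterate_add_apply]
      simp only [dif_neg h0]
      by_cases hpar : m % 2 = 1
      · simp only [hpar, if_pos]
        rw [pv_apply_comp, hrec]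
        have hstep : pvApply (1103515245, 12345) (pvStep^[m / 2 + m / 2] x)
            = pvStep (pvStep^[m / 2 + m / 2] x) := rfl
        rw [hstep]
        have hm : m = m / 2 + m / 2 + 1 := by omega
        conv_rhs => rw [hm]
        rw [Function.iterate_succ_apply']
      · simp only [if_neg hpar]
        rw [hrec]
        have hm : m / 2 + m / 2 = m := by omega
        rw [hm]

lemma pv_altRun (n : Int) (hn : ¬ n ≤ 0) : g_dyn_alt n = pvStep^[n.toNat] 1 := by
  unfold g_dyn_alt
  rw [if_neg hn]
  have h := pv_pw_apply n.toNat 1 (by norm_num) (by norm_num)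
  unfold pvApply at h
  simpa using h

-- ===== VERDICT (by name: the statement is the Claim_ definition above) =====
theorem g_dyn_spec : Claim_equal_g_dyn := by
  intro n _
  unfold Spec_g_dyn g_dyn
  simp only
  by_cases hn : n ≤ 0
  · rw [PySem.List.pyRange_one_eq_nil (by omega)]
    simp [g_dyn_alt, hn]
  · rw [pv_foldA _ 1 (by norm_num), pv_altRun n hn,
        PySem.List.length_pyRange_one]
    have : (n + 1 - 1).toNat = n.toNat := by omega
    rw [this]
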